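-- pv_equiv track=rewrite | github.com/seta-hoannguyen/advanced-algorithms | reversedSumOfDigits.py | reversedSumOfDigits
-- ===== SOURCE A (Python) =====
-- def reversedSumOfDigits(p, n):
--     if n == 1:
--         return str(p) if p <= 9 else "-1"
--     start = int("1" + "0"* (n-1))
--
--     arr = list(str(start))
--     if p == 1:
--         return ''.join(arr)
--
--     index = len(arr) - 1
--     flag = False
--     curr = 0
--     while curr < p and index >= 0:
--         if p - curr >= 10:
--             arr[index] = '9'
--             curr += 9
--         else:
--             tmp = str(p - curr)
--             if index != 0:
--                 tmp = str(p - curr - int(arr[0]))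
--             arr[index] = tmp
--             flag = True
--             break
--         index -= 1
--
--     if flag == True:
--         return ''.join(arr)
--     return "-1"
-- ===== SOURCE B (Python) =====
-- def reversedSumOfDigits(p, n):
--     if n == 1:
--         return str(p) if p <= 9 else "-1"
--     if p < 1 or p > 9 * n:
--         return "-1"
--     nines = (p - 1) // 9
--     rem = (p - 1) % 9
--     if nines == n - 1:
--         return str(1 + rem) + "9" * nines
--     return "1" + "0" * (n - 2 - nines) + str(rem) + "9" * nines
-- ===== Notes on version B (the rewrite author's own statement) =====
-- stated objective: simpler
-- what changed: Replaces A's construction of int('1'+'0'*(n-1)) plus a greedy per-digit while-loop filling 9s from the right with a closed-form (p-1) divmod 9 and direct string concatenation.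
-- intended difference: For n <= 0 (not a valid digit count) with 1 <= p <= 9, A degenerates to the one-cell array ['1'] and returns str(p) as if n were 1, while B returns '-1' because no n-digit number exists for n <= 0, which is the intended answer. — e.g. on reversedSumOfDigits(5, 0): A returns "5", B returns "-1"
import Mathlib
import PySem

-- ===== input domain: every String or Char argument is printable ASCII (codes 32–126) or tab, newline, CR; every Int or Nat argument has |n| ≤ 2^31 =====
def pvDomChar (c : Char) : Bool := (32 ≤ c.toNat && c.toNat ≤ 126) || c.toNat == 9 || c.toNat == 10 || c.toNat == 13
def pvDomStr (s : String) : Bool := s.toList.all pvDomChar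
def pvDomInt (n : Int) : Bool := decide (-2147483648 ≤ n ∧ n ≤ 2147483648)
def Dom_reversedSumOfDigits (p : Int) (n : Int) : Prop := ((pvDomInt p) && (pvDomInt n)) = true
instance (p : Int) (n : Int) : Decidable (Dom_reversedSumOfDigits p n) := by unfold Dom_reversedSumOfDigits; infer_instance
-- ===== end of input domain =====

-- B replaces A's int("1"+"0"*(n-1)) construction and greedy per-digit 9-filling loop by a
-- closed-form (p-1) divmod 9 plus direct string concatenation (objective: simpler).

-- ===== PORT A =====
-- A's while loop, state (arr, index, curr); the fuel argument (= index+1 at every call, an exact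
-- bound on the remaining iterations since index drops by 1 per iteration) only makes the
-- recursion structural; the 'flag/break' exit returns the joined array directly.
def loopA (p : Int) : Nat → List (List Char) → Int → Int → String
  | fuel+1, arr, index, curr =>
    if curr < p ∧ 0 ≤ index then
      if 10 ≤ p - curr then
        loopA p fuel (PySem.List.pySetD arr index ['9']) (index - 1) (curr + 9)
      else
        -- tmp = str(p - curr) resp. str(p - curr - int(arr[0])); arr[0] is always in range
        -- (arr ≠ []) and holds a digit, so the pyGetD/getD defaults are never used
        let tmp : List Char :=
          if index ≠ 0 then
            PySem.Int.toChars (p - curr - (PySem.Int.ofChars? (PySem.List.pyGetD arr 0 [])).getD 0)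
          else PySem.Int.toChars (p - curr)
        String.ofList (PySem.Chars.join [] (PySem.List.pySetD arr index tmp))
    else "-1"
  | 0, _, _, _ => "-1"

def reversedSumOfDigits (p : Int) (n : Int) : String :=
  if n == 1 then (if p ≤ 9 then PySem.Int.toStr p else "-1")
  else
    -- start = int("1" + "0"*(n-1)); int() cannot raise on this canonical numeral, so getD's default is never used
    let start : Int := (PySem.Int.ofChars? ('1' :: PySem.List.pyRepeat ['0'] (n - 1))).getD 0
    -- arr = list(str(start)) : a list of one-character strings
    let arr : List (List Char) := (PySem.Int.toChars start).map (fun c => [c])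
    if p == 1 then String.ofList (PySem.Chars.join [] arr)
    else
      let index : Int := PySem.List.len arr - 1
      loopA p (index + 1).toNat arr index 0

-- ===== PORT B =====
def reversedSumOfDigits_alt (p : Int) (n : Int) : String :=
  if n == 1 then (if p ≤ 9 then PySem.Int.toStr p else "-1")
  else if p < 1 ∨ 9 * n < p then "-1"
  else
    let nines : Int := PySem.Int.floordiv (p - 1) 9
    let rem : Int := PySem.Int.mod (p - 1) 9
    if nines == n - 1 then
      String.ofList (PySem.Int.toChars (1 + rem) ++ PySem.List.pyRepeat ['9'] nines)
    else
      String.ofList ('1' :: (PySem.List.pyRepeat ['0'] (n - 2 - nines) ++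
        (PySem.Int.toChars rem ++ PySem.List.pyRepeat ['9'] nines)))

-- ===== PRECONDITION & SPEC =====
-- For n ≤ 0 (not a valid digit count) with 1 ≤ p ≤ 9, A degenerates to the one-cell array ['1'] and
-- returns str(p) as if n were 1, while B returns "-1" because no n-digit number exists for n ≤ 0,
-- which is the intended answer.
def D_reversedSumOfDigits (p : Int) (n : Int) : Prop := n ≤ 0 ∧ 1 ≤ p ∧ p ≤ 9
instance (p : Int) (n : Int) : Decidable (D_reversedSumOfDigits p n) := by unfold D_reversedSumOfDigits; infer_instance

def Spec_reversedSumOfDigits (p : Int) (n : Int) (out : String) : Prop :=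
  ¬ D_reversedSumOfDigits p n → out = reversedSumOfDigits_alt p n
instance (p : Int) (n : Int) (out : String) : Decidable (Spec_reversedSumOfDigits p n out) := by
  unfold Spec_reversedSumOfDigits; infer_instance

def pvDiffWitness_reversedSumOfDigits : Int × Int := (5, 0)
def pvDiffWitnessOut_reversedSumOfDigits : String × String := ("5", "-1")

-- ===== CLAIM (what is proved, stated in full; the proofs are below) =====
def Claim_unchanged_reversedSumOfDigits : Prop := ∀ (p : Int) (n : Int), Dom_reversedSumOfDigits p n → Spec_reversedSumOfDigits p n (reversedSumOfDigits p n)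
def Claim_changed_reversedSumOfDigits : Prop := Dom_reversedSumOfDigits (pvDiffWitness_reversedSumOfDigits.1) (pvDiffWitness_reversedSumOfDigits.2) ∧ D_reversedSumOfDigits (pvDiffWitness_reversedSumOfDigits.1) (pvDiffWitness_reversedSumOfDigits.2) ∧ reversedSumOfDigits (pvDiffWitness_reversedSumOfDigits.1) (pvDiffWitness_reversedSumOfDigits.2) = pvDiffWitnessOut_reversedSumOfDigits.1 ∧ reversedSumOfDigits_alt (pvDiffWitness_reversedSumOfDigits.1) (pvDiffWitness_reversedSumOfDigits.2) = pvDiffWitnessOut_reversedSumOfDigits.2 ∧ pvDiffWitnessOut_reversedSumOfDigits.1 ≠ pvDiffWitnessOut_reversedSumOfDigits.2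
def Claim_exact_reversedSumOfDigits : Prop := ∀ (p : Int) (n : Int), Dom_reversedSumOfDigits p n → D_reversedSumOfDigits p n → reversedSumOfDigits p n ≠ reversedSumOfDigits_alt p n

-- ===== LEMMAS AND PROOFS =====

-- Python's int() digit scan, abstracted: any g satisfying its defining equations maps a block of
-- k '0's onto multiplication by 10^k.
theorem goMaster (g : List Char → Bool → Nat → Option Nat)
    (hnil : ∀ b a, g [] b a = if b = true then some a else none)
    (hdig : ∀ c rest b a, c.isDigit = true → g (c::rest) b a = g rest true (a * 10 + (c.toNat - '0'.toNat))) :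
    ∀ (k : Nat) (a : Nat), g (List.replicate k '0') true a = some (a * 10^k) := by
  intro k
  induction k with
  | zero => intro a; simp [hnil]
  | succ k ih =>
    intro a
    rw [List.replicate_succ, hdig '0' _ true a (by decide), ih]
    norm_num [Nat.pow_succ]
    ring

-- int("1" + "0"*k) = 10^k
theorem parse_one_zeros (k : Nat) :
    PySem.Int.ofChars? ('1' :: List.replicate k '0') = some ((10:Int)^k) := by
  unfold PySem.Int.ofChars?
  have hds : List.dropWhile PySem.Int.isIntSpace ('1'::List.replicate k '0') = '1'::List.replicate k '0' := by
    rw [List.dropWhile_cons_of_neg]; simp [PySem.Int.isIntSpace]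
  rw [hds]
  have hds2 : List.dropWhile PySem.Int.isIntSpace ('1'::List.replicate k '0').reverse = ('1'::List.replicate k '0').reverse := by
    cases k with
    | zero => simp [PySem.Int.isIntSpace]
    | succ k =>
      rw [List.replicate_succ']
      have : ('1' :: (List.replicate k '0' ++ ['0'])).reverse = '0' :: (List.replicate k '0').reverse ++ ['1'] := by
        simp
      rw [this, List.cons_append, List.dropWhile_cons_of_neg]; simp [PySem.Int.isIntSpace]
  rw [hds2, List.reverse_reverse]
  simp only []
  split
  · rename_i ds h; exact absurd (List.cons.injEq .. ▸ h) (by simp)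
  · rename_i ds h; exact absurd (List.cons.injEq .. ▸ h) (by simp)
  · -- the digit-scanning helper of ofChars? is private; we reach it through unification:
    -- gd below unifies with it, g with its inner loop, and the equations are closed by rfl
    have key : ∀ (gd : List Char → Option Nat) (g : List Char → Bool → Nat → Option Nat)
        (hgd : ∀ rest, gd ('1'::rest) = g rest true 1)
        (hnil : ∀ b a, g [] b a = if b = true then some a else none)
        (hcons : ∀ c rest b a, g (c::rest) b a =
          if c.isDigit = true then g rest true (a * 10 + (c.toNat - '0'.toNat))
          else if c = '_' ∧ b = true then
            (match rest with
             | d :: _ => if d.isDigit = true then g rest false a else none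
             | [] => none)
          else none),
        (Option.map (fun n => n) (do
          let a ← gd ('1'::List.replicate k '0')
          pure ((a : Int)))) = some ((10:Int)^k) := by
      intro gd g hgd hnil hcons
      rw [hgd]
      have h2 := goMaster g (fun b a => by rw [hnil]) (fun c rest b a hc => by rw [hcons, if_pos hc]) k 1
      rw [h2]
      simp
    apply key
    · intro rest; rfl
    · intro b a; rfl
    · intro c rest b a; rfl

theorem toDigitsCore_pow (k : Nat) : ∀ (f : Nat) (ds : List Char), k < f →
    Nat.toDigitsCore 10 f (10^k) ds = '1' :: (List.replicate k '0' ++ ds) := by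
  induction k with
  | zero =>
    intro f ds hf
    match f, hf with
    | f+1, _ => simp [Nat.toDigitsCore, Nat.digitChar]
  | succ k ih =>
    intro f ds hf
    match f, hf with
    | f+1, hf =>
      have h1 : 10^(k+1) % 10 = 0 := by simp [Nat.pow_succ]
      have h2 : 10^(k+1) / 10 = 10^k := by
        rw [Nat.pow_succ, Nat.mul_div_cancel]; omega
      have h3 : 10^k ≠ 0 := by positivity
      simp only [Nat.toDigitsCore, h1, h2, if_neg h3]
      rw [show Nat.digitChar 0 = '0' from rfl, ih f ('0'::ds) (by omega)]
      simp [List.replicate_succ', List.append_assoc]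

-- str(10^k) = "1" + "0"*k
theorem print_one_zeros (k : Nat) :
    PySem.Int.toChars ((10:Int)^k) = '1' :: List.replicate k '0' := by
  have : ((10:Int)^k).toNat = 10^k := by
    rw [show ((10:Int)^k) = ((10^k : Nat) : Int) by push_cast; ring, Int.toNat_natCast]
  simp only [PySem.Int.toChars, if_neg (not_lt.mpr (by positivity : (0:Int) ≤ 10^k)), this]
  unfold Nat.toDigits
  rw [toDigitsCore_pow k (10^k+1) [] (by have := Nat.lt_pow_self (by omega : 1 < 10) (n := k); omega)]
  simp

theorem join_nil_flatten (ls : List (List Char)) : PySem.Chars.join [] ls = ls.flatten := by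
  simp only [PySem.Chars.join, List.intercalate]
  induction ls with
  | nil => rfl
  | cons a t ih =>
    cases t with
    | nil => simp
    | cons b t2 =>
      simp only [List.intersperse, List.flatten_cons] at *
      simp [ih]

-- setting the last '0' cell (position j+1) of the arrays A's loop reaches
theorem set_last_zero (j : Nat) (R : List (List Char)) (v : List Char) :
    PySem.List.pySetD (['1'] :: (List.replicate (j+1) ['0'] ++ R)) ((j+1 : Nat) : Int) v
      = ['1'] :: (List.replicate j ['0'] ++ ([v] ++ R)) := by
  rw [PySem.List.pySetD_natCast, List.set_cons_succ, List.replicate_succ', List.append_assoc,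
    List.set_append_right _ _ (by simp)]
  simp

-- closed form of A's loop on the states it actually reaches
theorem loopA_closed (p : Int) (j : Nat) : ∀ (k : Nat) (q r : Int),
    (p - 9*k - 1 = 9*q + r) → (0 ≤ r) → (r < 9) →
    loopA p (j+1) (['1'] :: (List.replicate j ['0'] ++ List.replicate k ['9'])) (j : Int) (9*(k:Int)) =
      (if p - 9*(k:Int) ≤ 0 then "-1"
      else if 9*((j:Int)+1) < p - 9*(k:Int) then "-1"
      else if q = (j:Int) then String.ofList (PySem.Int.toChars (r+1) ++ List.replicate (k+j) '9')
      else String.ofList ('1' :: (List.replicate (j-1-q.toNat) '0' ++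
        (PySem.Int.toChars r ++ List.replicate (k+q.toNat) '9')))) := by
  induction j with
  | zero =>
    intro k q r hq hr0 hr9
    simp only [loopA]
    split_ifs with hc h2 hA hB hq0 hA hB hq0 hA hB hq0
    all_goals try rfl
    all_goals try (exfalso; omega)
    all_goals
      (rw [show PySem.List.pySetD (['1'] :: (List.replicate 0 ['0'] ++ List.replicate k ['9'])) ((0:Nat):Int)
            (PySem.Int.toChars (p - 9 * (k:Int)))
            = PySem.Int.toChars (p - 9*(k:Int)) :: List.replicate k ['9'] by
          rw [PySem.List.pySetD_natCast]; rfl,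
        join_nil_flatten,
        show p - 9*(k:Int) = r + 1 by omega]
       simp)
  | succ j ih =>
    intro k q r hq hr0 hr9
    rw [loopA]
    by_cases hc : 9*(k:Int) < p ∧ (0:Int) ≤ ((j+1:Nat):Int)
    · rw [if_pos hc]
      by_cases h2 : 10 ≤ p - 9*(k:Int)
      · rw [if_pos h2]
        rw [set_last_zero j _ ['9'],
            show (([['9']] : List (List Char)) ++ List.replicate k ['9']) = List.replicate (k+1) ['9'] by
              simp [List.replicate_succ],
            show ((j+1:Nat):Int) - 1 = (j:Int) by push_cast; ring,
            show (9*(k:Int) + 9) = 9*((k+1:Nat):Int) by push_cast; ring,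
            ih (k+1) (q-1) r (by push_cast; omega) hr0 hr9]
        have hq1 : 1 ≤ q := by omega
        rw [show ((q-1).toNat) = q.toNat - 1 by omega,
            show k + 1 + (q.toNat - 1) = k + q.toNat by omega,
            show j - 1 - (q.toNat - 1) = j + 1 - 1 - q.toNat by omega,
            show k + 1 + j = k + (j+1) by omega]
        split_ifs <;> first | rfl | (exfalso; push_cast at *; omega)
      · rw [if_neg h2]
        rw [if_pos (show ((j+1:Nat):Int) ≠ 0 by push_cast; omega)]
        simp only [PySem.List.pyGetD_zero_cons]
        rw [show (PySem.Int.ofChars? ['1']).getD 0 = 1 by decide,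
            set_last_zero j _ _, join_nil_flatten]
        simp only [List.flatten_cons, List.flatten_append, List.flatten_replicate_singleton,
          List.flatten_nil]
        have hq0 : q = 0 := by omega
        rw [show p - 9*(k:Int) - 1 = r by omega]
        rw [show j + 1 - 1 - q.toNat = j by omega, show k + q.toNat = k by omega]
        split_ifs <;> first | rfl | (exfalso; push_cast at *; omega) | simp
    · rw [if_neg hc]
      have hple : p ≤ 9*(k:Int) := by
        by_contra hlt
        exact hc ⟨by omega, by positivity⟩
      split_ifs <;> first | rfl | (exfalso; omega)

-- A for n ≠ 1, with start/arr evaluated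
theorem A_eval (p n : Int) (hn : ¬ n = 1) :
    reversedSumOfDigits p n =
      (if p == 1 then String.ofList ('1' :: List.replicate (n-1).toNat '0')
       else loopA p ((n-1).toNat + 1) (['1'] :: List.replicate (n-1).toNat ['0']) ((n-1).toNat : Int) 0) := by
  unfold reversedSumOfDigits
  rw [if_neg (by simp [hn])]
  simp only [PySem.List.pyRepeat_singleton, parse_one_zeros, Option.getD_some, print_one_zeros,
    List.map_cons, List.map_replicate, PySem.List.len_eq, List.length_cons,
    List.length_replicate]
  rw [show ((((n-1).toNat + 1 : Nat)):Int) - 1 = ((n-1).toNat : Int) by push_cast; ring,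
    show (((n-1).toNat : Int) + 1).toNat = (n-1).toNat + 1 by omega]
  congr 1
  rw [join_nil_flatten]
  simp [List.flatten_replicate_singleton]

-- B for n ≠ 1, p ≥ 1 in terms of q = (p-1)//9 and r = (p-1)%9
theorem B_eval (p n : Int) (hn : ¬ n = 1) (hp : ¬ (p < 1 ∨ 9*n < p)) :
    reversedSumOfDigits_alt p n =
      (if PySem.Int.floordiv (p-1) 9 = n - 1 then
        String.ofList (PySem.Int.toChars (1 + PySem.Int.mod (p-1) 9) ++
          List.replicate (PySem.Int.floordiv (p-1) 9).toNat '9')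
      else
        String.ofList ('1' :: (List.replicate (n - 2 - PySem.Int.floordiv (p-1) 9).toNat '0' ++
          (PySem.Int.toChars (PySem.Int.mod (p-1) 9) ++
            List.replicate (PySem.Int.floordiv (p-1) 9).toNat '9')))) := by
  unfold reversedSumOfDigits_alt
  rw [if_neg (by simp [hn]), if_neg hp]
  simp only [PySem.List.pyRepeat_singleton, beq_iff_eq]

-- ===== VERDICT (by name: the statement is the Claim_ definition above) =====
theorem reversedSumOfDigits_spec : Claim_unchanged_reversedSumOfDigits := by
  intro p n _ hnd
  unfold D_reversedSumOfDigits at hnd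
  by_cases hn : n = 1
  · subst hn; rfl
  · rw [A_eval p n hn]
    set m : Nat := (n-1).toNat with hm
    set q : Int := PySem.Int.floordiv (p-1) 9 with hqdef
    set r : Int := PySem.Int.mod (p-1) 9 with hrdef
    have hq : q * 9 + r = p - 1 := PySem.Int.floordiv_mul_add_mod (p-1) 9
    have hr0 : 0 ≤ r := PySem.Int.mod_nonneg _ (by omega)
    have hr9 : r < 9 := PySem.Int.mod_lt _ (by omega)
    by_cases hp1 : p = 1
    · subst hp1
      have hn2 : 2 ≤ n := by omega
      rw [if_pos (by decide), B_eval _ _ hn (by omega)]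
      rw [show PySem.Int.floordiv ((1:Int)-1) 9 = 0 from by decide,
          show PySem.Int.mod ((1:Int)-1) 9 = 0 from by decide]
      rw [if_neg (by omega)]
      congr 1
      rw [show PySem.Int.toChars 0 = ['0'] from rfl, Int.toNat_zero, List.replicate_zero]
      rw [show m = (n-2-0).toNat + 1 by omega, List.replicate_succ']
      simp
    · rw [if_neg (by simp [hp1])]
      rw [show (['1'] :: List.replicate m ['0'])
            = ['1'] :: (List.replicate m ['0'] ++ List.replicate 0 ['9']) by simp,
          show (0:Int) = 9*((0:Nat):Int) by simp,
          loopA_closed p m 0 q r (by push_cast; omega) hr0 hr9]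
      by_cases hp0 : p < 1
      · rw [if_pos (by push_cast; omega)]
        unfold reversedSumOfDigits_alt
        rw [if_neg (by simp [hn]), if_pos (Or.inl hp0)]
      · by_cases hpn : 9*n < p
        · rw [if_neg (by push_cast; omega), if_pos (by push_cast; omega)]
          unfold reversedSumOfDigits_alt
          rw [if_neg (by simp [hn]), if_pos (Or.inr hpn)]
        · -- 1 ≤ p ≤ 9n and p ≠ 1, so 2 ≤ n
          have hn2 : 2 ≤ n := by omega
          have hmn : (m:Int) = n - 1 := by omega
          rw [if_neg (by push_cast; omega), if_neg (by push_cast; omega),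
              B_eval _ _ hn (by omega), hmn]
          have hq0' : 0 ≤ q := by omega
          split_ifs with hqm
          · rw [add_comm r 1, show (0 + m) = q.toNat by omega]
          · rw [show m - 1 - q.toNat = (n - 2 - q).toNat by omega,
                show (0 + q.toNat) = q.toNat by omega]

theorem reversedSumOfDigits_changed : Claim_changed_reversedSumOfDigits := by
  unfold Claim_changed_reversedSumOfDigits; decide

theorem reversedSumOfDigits_tight : Claim_exact_reversedSumOfDigits := by
  intro p n _ hd
  obtain ⟨hn0, hp1, hp9⟩ := hd
  have hA : reversedSumOfDigits p n = PySem.Int.toStr p := by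
    rw [A_eval p n (by omega), show (n-1).toNat = 0 by omega]
    by_cases hp : p = 1
    · subst hp
      rw [if_pos (by decide)]
      rfl
    · rw [if_neg (by simp [hp]), show ((0:Nat):Int) = (0:Int) from rfl]
      simp only [loopA, List.replicate_zero]
      rw [if_pos ⟨by omega, by omega⟩, if_neg (by omega)]
      rw [if_neg (by simp), sub_zero, show PySem.List.pySetD [['1']] (0:Int) (PySem.Int.toChars p)
            = [PySem.Int.toChars p] by simp [pysem],
          join_nil_flatten]
      simp only [List.flatten_cons, List.flatten_nil, List.append_nil]
      rw [show String.ofList (PySem.Int.toChars p) = PySem.Int.toStr p from by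
        rw [← PySem.Int.toList_toStr, String.ofList_toList]]
  have hB : reversedSumOfDigits_alt p n = "-1" := by
    unfold reversedSumOfDigits_alt
    rw [if_neg (by simp; omega), if_pos (Or.inr (by omega))]
  rw [hA, hB]
  interval_cases p <;> decide
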